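-- pv_equiv track=rewrite | github.com/androu07/proyectoCloud | net_sec_api/topology_calculator.py | tree_links
-- ===== SOURCE A (Python) =====
-- from typing import List, Tuple
--
-- def tree_links(num_vms: int, branches: int = 2) -> List[Tuple[int, int]]:
--     """Árbol con número de ramas por nodo"""
--     links = []
--     vm_counter = 2  # Empezar desde vm2 (vm1 es raíz)
--     parent_queue = [1]
--
--     while vm_counter <= num_vms and parent_queue:
--         next_parents = []
--         for parent in parent_queue:
--             for _ in range(branches):
--                 if vm_counter > num_vms:
--                     break
--                 links.append((parent, vm_counter))
--                 next_parents.append(vm_counter)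
--                 vm_counter += 1
--             if vm_counter > num_vms:
--                 break
--         parent_queue = next_parents
--
--     return links
-- ===== SOURCE B (Python) =====
-- from typing import List, Tuple
--
-- def tree_links(num_vms: int, branches: int = 2) -> List[Tuple[int, int]]:
--     """Árbol con número de ramas por nodo"""
--     if branches < 1:
--         return []
--     return [((vm - 2) // branches + 1, vm) for vm in range(2, num_vms + 1)]
-- ===== Notes on version B (the rewrite author's own statement) =====
-- stated objective: simpler
-- what changed: Replaces the BFS level simulation (parent_queue/next_parents with nested break-laden loops) by the closed-form parent index of a complete k-ary tree: one comprehension over range(2, num_vms+1) with parent (vm-2)//branches+1.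
import Mathlib
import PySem

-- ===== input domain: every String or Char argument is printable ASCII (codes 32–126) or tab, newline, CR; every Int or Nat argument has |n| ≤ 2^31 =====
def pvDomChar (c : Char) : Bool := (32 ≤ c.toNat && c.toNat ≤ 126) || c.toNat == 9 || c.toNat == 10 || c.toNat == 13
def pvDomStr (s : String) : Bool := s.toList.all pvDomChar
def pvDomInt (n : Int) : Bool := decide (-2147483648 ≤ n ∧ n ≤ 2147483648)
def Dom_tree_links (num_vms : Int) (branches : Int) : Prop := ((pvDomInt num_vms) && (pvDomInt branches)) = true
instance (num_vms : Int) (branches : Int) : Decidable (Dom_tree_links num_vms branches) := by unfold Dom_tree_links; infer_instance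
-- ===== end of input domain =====

-- B replaces A's BFS level simulation by the closed-form k-ary-tree parent index (objective: simpler).

-- ===== PORT A =====
-- inner `for _ in range(branches)` loop: returns (links appended, next_parents appended, new vm_counter)
def pvInnerA (parent nv : Int) : Nat → Int → (List (Int × Int) × List Int × Int)
  | 0, c => ([], [], c)
  | n+1, c =>
      if c > nv then ([], [], c)          -- `if vm_counter > num_vms: break`
      else
        let r := pvInnerA parent nv n (c+1)
        ((parent, c) :: r.1, c :: r.2.1, r.2.2)

-- `for parent in parent_queue` loop, with the trailing `if vm_counter > num_vms: break`
def pvLevelA (nv br : Int) : List Int → Int → (List (Int × Int) × List Int × Int)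
  | [], c => ([], [], c)
  | p :: ps, c =>
      let r1 := pvInnerA p nv br.toNat c
      if r1.2.2 > nv then r1
      else
        let r2 := pvLevelA nv br ps r1.2.2
        (r1.1 ++ r2.1, r1.2.1 ++ r2.2.1, r2.2.2)

-- lemmas needed by pvWhileA's termination proof (cited in decreasing_by)
theorem pvInnerA_le (parent nv : Int) : ∀ (n : Nat) (c : Int), c ≤ (pvInnerA parent nv n c).2.2 := by
  intro n
  induction n with
  | zero => intro c; simp [pvInnerA]
  | succ n ih =>
      intro c
      simp only [pvInnerA]
      split
      · simp
      · have := ih (c+1); dsimp only; omega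

theorem pvLevelA_le (nv br : Int) : ∀ (ps : List Int) (c : Int), c ≤ (pvLevelA nv br ps c).2.2 := by
  intro ps
  induction ps with
  | nil => intro c; simp [pvLevelA]
  | cons p ps ih =>
      intro c
      simp only [pvLevelA]
      split
      · exact pvInnerA_le p nv br.toNat c
      · have h1 := pvInnerA_le p nv br.toNat c
        have h2 := ih (pvInnerA p nv br.toNat c).2.2
        dsimp only; omega

theorem pvInnerA_succ_le (parent nv : Int) (n : Nat) (c : Int) (hc : c ≤ nv) :
    c + 1 ≤ (pvInnerA parent nv (n+1) c).2.2 := by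
  simp only [pvInnerA]
  split
  · omega
  · have := pvInnerA_le parent nv n (c+1); omega

theorem pvLevelA_zero (nv br : Int) (hbr : br.toNat = 0) :
    ∀ (ps : List Int) (c : Int), pvLevelA nv br ps c = ([], [], c) := by
  intro ps
  induction ps with
  | nil => intro c; simp [pvLevelA]
  | cons p ps ih =>
      intro c
      simp only [pvLevelA, hbr, pvInnerA]
      split
      · rfl
      · simp [ih c]

theorem pvLevelA_pos (nv br : Int) (hbr : 1 ≤ br.toNat) (p : Int) (ps : List Int) (c : Int)
    (hc : c ≤ nv) : c + 1 ≤ (pvLevelA nv br (p :: ps) c).2.2 := by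
  obtain ⟨n, hn⟩ : ∃ n, br.toNat = n + 1 := ⟨br.toNat - 1, by omega⟩
  simp only [pvLevelA, hn]
  split
  · exact pvInnerA_succ_le p nv n c hc
  · have h1 := pvInnerA_succ_le p nv n c hc
    have h2 := pvLevelA_le nv br ps (pvInnerA p nv (n+1) c).2.2
    dsimp only; omega

-- the outer `while vm_counter <= num_vms and parent_queue` loop
def pvWhileA (nv br : Int) (queue : List Int) (c : Int) (links : List (Int × Int)) :
    List (Int × Int) :=
  if h : c ≤ nv ∧ queue ≠ [] then
    let r := pvLevelA nv br queue c
    pvWhileA nv br r.2.1 r.2.2 (links ++ r.1)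
  else links
termination_by ((nv + 1 - c).toNat, queue.length)
decreasing_by
  rcases h with ⟨hc, hq⟩
  obtain ⟨p, ps, rfl⟩ := List.exists_cons_of_ne_nil hq
  by_cases hbr : br.toNat = 0
  · rw [pvLevelA_zero nv br hbr]
    simp [Prod.lex_iff]
  · have := pvLevelA_pos nv br (by omega) p ps c hc
    apply Prod.Lex.left
    omega

def tree_links (num_vms : Int) (branches : Int) : List (Int × Int) :=
  pvWhileA num_vms branches [1] 2 []

-- ===== PORT B =====
def tree_links_alt (num_vms : Int) (branches : Int) : List (Int × Int) :=
  if branches < 1 then []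
  else (PySem.List.pyRange 2 (num_vms + 1) 1).map
    (fun vm => (PySem.Int.floordiv (vm - 2) branches + 1, vm))

-- ===== PRECONDITION & SPEC =====
def Spec_tree_links (num_vms : Int) (branches : Int) (out : List (Int × Int)) : Prop := out = tree_links_alt num_vms branches
instance (num_vms : Int) (branches : Int) (out : List (Int × Int)) : Decidable (Spec_tree_links num_vms branches out) := by unfold Spec_tree_links; infer_instance

-- ===== CLAIM (what is proved, stated in full; the proofs are below) =====
def Claim_equal_tree_links : Prop := ∀ (num_vms : Int) (branches : Int), Dom_tree_links num_vms branches → Spec_tree_links num_vms branches (tree_links num_vms branches)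

-- ===== LEMMAS AND PROOFS =====

-- closed-form parent: for v in the child block of p, (v-2)//br + 1 = p
theorem pvParent_eq (br : Int) (hbr : 0 < br) (p v : Int)
    (h1 : (p - 1) * br + 2 ≤ v) (h2 : v < p * br + 2) :
    PySem.Int.floordiv (v - 2) br + 1 = p := by
  have : PySem.Int.floordiv (v - 2) br = p - 1 := by
    rw [PySem.Int.floordiv_eq_iff_of_pos hbr]
    constructor
    · linarith
    · have h3 : (p - 1 + 1) * br = p * br := by ring
      linarith
  omega

theorem pvInnerA_eq (nv : Int) : ∀ (n : Nat) (c p : Int), c ≤ nv + 1 →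
    pvInnerA p nv n c =
      ((PySem.List.pyRange c (min (c + (n : Int)) (nv + 1)) 1).map (fun v => (p, v)),
       PySem.List.pyRange c (min (c + (n : Int)) (nv + 1)) 1,
       min (c + (n : Int)) (nv + 1)) := by
  intro n
  induction n with
  | zero =>
      intro c p hc
      have : min (c + ((0 : Nat) : Int)) (nv + 1) = c := by omega
      rw [this]
      simp [pvInnerA, PySem.List.pyRange_one_eq_nil (by omega : c ≤ c)]
  | succ n ih =>
      intro c p hc
      simp only [pvInnerA]
      split
      · -- c > nv, so c = nv + 1
        have hmin : min (c + ((n + 1 : Nat) : Int)) (nv + 1) = c := by omega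
        rw [hmin]
        simp [PySem.List.pyRange_one_eq_nil (by omega : c ≤ c)]
      · -- c ≤ nv
        rename_i hle
        have hc1 : c + 1 ≤ nv + 1 := by omega
        rw [ih (c + 1) p hc1]
        have hmin : min (c + 1 + (n : Int)) (nv + 1) = min (c + ((n + 1 : Nat) : Int)) (nv + 1) := by
          push_cast; omega
        have hcons : PySem.List.pyRange c (min (c + ((n + 1 : Nat) : Int)) (nv + 1)) 1 =
            c :: PySem.List.pyRange (c + 1) (min (c + ((n + 1 : Nat) : Int)) (nv + 1)) 1 :=
          PySem.List.pyRange_one_cons (by omega)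
        rw [hmin, hcons]
        simp

theorem pvLevelA_eq (nv br : Int) (hbr : 1 ≤ br) :
    ∀ (m : Nat) (a c : Int), c = (a - 1) * br + 2 → c ≤ nv + 1 →
    pvLevelA nv br (PySem.List.pyRange a (a + (m : Int)) 1) c =
      ((PySem.List.pyRange c (min ((a + (m : Int) - 1) * br + 2) (nv + 1)) 1).map
         (fun v => (PySem.Int.floordiv (v - 2) br + 1, v)),
       PySem.List.pyRange c (min ((a + (m : Int) - 1) * br + 2) (nv + 1)) 1,
       min ((a + (m : Int) - 1) * br + 2) (nv + 1)) := by
  intro m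
  induction m with
  | zero =>
      intro a c hca hc
      have heq : (a + ((0 : Nat) : Int) - 1) * br + 2 = c := by rw [hca]; push_cast; ring
      have hmin : min ((a + ((0 : Nat) : Int) - 1) * br + 2) (nv + 1) = c := by rw [heq]; omega
      rw [hmin]
      have : PySem.List.pyRange a (a + ((0 : Nat) : Int)) 1 = [] :=
        PySem.List.pyRange_one_eq_nil (by omega)
      rw [this]
      simp [pvLevelA, PySem.List.pyRange_one_eq_nil (by omega : c ≤ c)]
  | succ m ih =>
      intro a c hca hc
      have hcons : PySem.List.pyRange a (a + ((m + 1 : Nat) : Int)) 1 =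
          a :: PySem.List.pyRange (a + 1) (a + ((m + 1 : Nat) : Int)) 1 :=
        PySem.List.pyRange_one_cons (by push_cast; omega)
      rw [hcons]
      simp only [pvLevelA]
      have hbrN : ((br.toNat : Nat) : Int) = br := Int.toNat_of_nonneg (by omega)
      have hinner := pvInnerA_eq nv br.toNat c a hc
      rw [hbrN] at hinner
      set e1 : Int := min (c + br) (nv + 1) with he1
      have he1c : e1 = min (a * br + 2) (nv + 1) := by
        have : c + br = a * br + 2 := by rw [hca]; ring
        rw [he1, this]
      -- links of the inner loop carry the closed-form parent
      have hmap : (PySem.List.pyRange c e1 1).map (fun v => (a, v)) =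
          (PySem.List.pyRange c e1 1).map (fun v => (PySem.Int.floordiv (v - 2) br + 1, v)) := by
        apply List.map_congr_left
        intro v hv
        rw [PySem.List.mem_pyRange_one] at hv
        have hv2 : v < a * br + 2 := by omega
        rw [pvParent_eq br (by omega) a v (by omega) hv2]
      rw [hinner]
      dsimp only
      split
      · -- e1 > nv, i.e. e1 = nv + 1 and the level is truncated here
        rename_i hgt
        have he : min ((a + ((m + 1 : Nat) : Int) - 1) * br + 2) (nv + 1) = e1 := by
          have h1 : a * br ≤ (a + ((m + 1 : Nat) : Int) - 1) * br :=
            mul_le_mul_of_nonneg_right (by push_cast; omega) (by omega)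
          omega
        rw [he, hmap]
      · -- inner loop exhausted (e1 ≤ nv): recurse on the remaining parents
        rename_i hng
        have he1v : e1 = a * br + 2 := by omega
        have hrec := ih (a + 1) e1 (by rw [he1v]; ring) (by omega)
        have harg : a + 1 + ((m : Nat) : Int) = a + ((m + 1 : Nat) : Int) := by push_cast; ring
        rw [harg] at hrec
        rw [hrec]
        dsimp only
        set e : Int := min ((a + ((m + 1 : Nat) : Int) - 1) * br + 2) (nv + 1) with he
        have hce1 : c ≤ e1 := by
          have h2 : (a - 1) * br ≤ a * br :=
            mul_le_mul_of_nonneg_right (by omega) (by omega)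
          omega
        have he1e : e1 ≤ e := by
          have h1 : a * br ≤ (a + ((m + 1 : Nat) : Int) - 1) * br :=
            mul_le_mul_of_nonneg_right (by push_cast; omega) (by omega)
          omega
        rw [← PySem.List.pyRange_one_append c e1 e hce1 he1e, hmap, ← List.map_append,
          ← PySem.List.pyRange_one_append c e1 e hce1 he1e]

theorem pvWhileA_eq (nv br : Int) (hbr : 1 ≤ br) :
    ∀ (k : Nat) (c : Int), (nv + 1 - c).toNat = k →
    ∀ (a : Int) (m : Nat) (links : List (Int × Int)), 1 ≤ m →
    c = (a - 1) * br + 2 → a + (m : Int) = c → c ≤ nv + 1 →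
    pvWhileA nv br (PySem.List.pyRange a (a + (m : Int)) 1) c links =
      links ++ (PySem.List.pyRange c (nv + 1) 1).map
        (fun v => (PySem.Int.floordiv (v - 2) br + 1, v)) := by
  intro k
  induction k using Nat.strong_induction_on with
  | _ k ih =>
      intro c hk a m links hm hca hac hc
      by_cases hcnv : c ≤ nv
      · -- the loop body runs
        have hne : PySem.List.pyRange a (a + (m : Int)) 1 ≠ [] := by
          rw [PySem.List.pyRange_one_cons (by omega)]
          simp
        rw [pvWhileA, dif_pos ⟨hcnv, hne⟩]
        have hlevel := pvLevelA_eq nv br hbr m a c hca hc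
        dsimp only
        rw [hlevel]
        dsimp only
        set e : Int := min ((a + (m : Int) - 1) * br + 2) (nv + 1) with he
        have hmbr : 1 ≤ (m : Int) * br := by
          have h0 : (1 : Int) ≤ (m : Int) := by exact_mod_cast hm
          nlinarith
        have hece : c + 1 ≤ e := by
          have h3 : (a + (m : Int) - 1) * br + 2 = c + (m : Int) * br := by
            linear_combination -hca
          omega
        by_cases hee : e ≤ nv
        · -- full level processed: recurse with the children as the new queue
          have hev : e = (a + (m : Int) - 1) * br + 2 := by omega
          have hq : PySem.List.pyRange c e 1 =
              PySem.List.pyRange c (c + (((e - c).toNat : Nat) : Int)) 1 := by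
            have : (((e - c).toNat : Nat) : Int) = e - c := Int.toNat_of_nonneg (by omega)
            rw [this]; ring_nf
          rw [hq]
          have hrec := ih (nv + 1 - e).toNat (by omega) e rfl c (e - c).toNat
            (links ++ (PySem.List.pyRange c e 1).map
              (fun v => (PySem.Int.floordiv (v - 2) br + 1, v)))
            (by omega)
            (by rw [hev]; linear_combination br * hac)
            (by omega)
            (by omega)
          rw [hq] at hrec
          rw [hrec, List.append_assoc, ← List.map_append, ← hq,
            ← PySem.List.pyRange_one_append c e (nv + 1) (by omega) (by omega)]
        · -- level truncated at nv + 1: the loop exits next iteration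
          have hev : e = nv + 1 := by omega
          rw [pvWhileA, dif_neg (by rintro ⟨h4, -⟩; omega)]
          rw [hev]
      · -- c = nv + 1: the loop does not run
        have hceq : c = nv + 1 := by omega
        rw [pvWhileA, dif_neg (by omega : ¬ (c ≤ nv ∧ PySem.List.pyRange a (a + (m : Int)) 1 ≠ []))]
        rw [hceq, PySem.List.pyRange_one_eq_nil (by omega)]
        simp

-- ===== VERDICT (by name: the statement is the Claim_ definition above) =====
theorem tree_links_spec : Claim_equal_tree_links := by
  intro nv br _
  unfold Spec_tree_links tree_links tree_links_alt
  by_cases hbr : br < 1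
  · -- branches < 1: range(branches) is empty, the queue empties, A returns []
    rw [if_pos hbr, pvWhileA]
    split
    · rw [pvLevelA_zero nv br (by omega)]
      dsimp only
      rw [pvWhileA, dif_neg (by simp)]
      simp
    · rfl
  · -- branches ≥ 1: the BFS numbering is the closed form
    have hbr' : (1 : Int) ≤ br := by omega
    rw [if_neg (by omega)]
    by_cases hnv : (2 : Int) ≤ nv + 1
    · have h1 : [(1 : Int)] = PySem.List.pyRange 1 (1 + ((1 : Nat) : Int)) 1 := by decide
      rw [h1]
      simpa using pvWhileA_eq nv br hbr' (nv + 1 - 2).toNat 2 rfl 1 1 [] le_rfl (by ring)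
        (by norm_num) hnv
    · rw [pvWhileA, dif_neg (by rintro ⟨h4, -⟩; omega)]
      rw [PySem.List.pyRange_one_eq_nil (by omega)]
      simp
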